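-- pv_equiv track=rewrite | github.com/pypi-data/pypi-mirror-398 | packages/nsip-mcp-server/nsip_mcp_server-1.4.4.tar.gz/nsip_mcp_server-1.4.4/src/nsip_mcp/shepherd/domains/calendar.py | _timing_matches_month
-- ===== SOURCE A (Python) =====
-- def _timing_matches_month(timing: str, month: int) -> bool:
--     """Check if a timing string matches a given month."""
--     seasons = {
--         "spring": [3, 4, 5],
--         "summer": [6, 7, 8],
--         "fall": [9, 10, 11],
--         "autumn": [9, 10, 11],
--         "winter": [12, 1, 2],
--     }
--
--     for season, months in seasons.items():
--         if season in timing.lower() and month in months: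
--             return True
--
--     return "year-round" in timing.lower() or "ongoing" in timing.lower()
-- ===== SOURCE B (Python) =====
-- # B: arithmetic season computation -- no season table at all; the season index is
-- # (month % 12) // 3 (0=winter,1=spring,2=summer,3=fall), valid for months 1..12.
-- def _timing_matches_month(timing: str, month: int) -> bool:
--     lowered = timing.lower()
--     if 1 <= month <= 12:
--         idx = (month % 12) // 3  # 0 winter, 1 spring, 2 summer, 3 fall
--         name = ("winter", "spring", "summer", "fall")[idx]
--         if name in lowered or (idx == 3 and "autumn" in lowered):
--             return True
--     return "year-round" in lowered or "ongoing" in lowered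
-- ===== Notes on version B (the rewrite author's own statement) =====
-- stated objective: alternative
-- what changed: Drops the season->months table entirely: the season is computed arithmetically as index (month % 12) // 3 into a 4-name tuple (with 'autumn' as a synonym when the index is fall), so only the one relevant season name is substring-tested, instead of scanning all five (season, months) pairs with list-membership tests.
import Mathlib
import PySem

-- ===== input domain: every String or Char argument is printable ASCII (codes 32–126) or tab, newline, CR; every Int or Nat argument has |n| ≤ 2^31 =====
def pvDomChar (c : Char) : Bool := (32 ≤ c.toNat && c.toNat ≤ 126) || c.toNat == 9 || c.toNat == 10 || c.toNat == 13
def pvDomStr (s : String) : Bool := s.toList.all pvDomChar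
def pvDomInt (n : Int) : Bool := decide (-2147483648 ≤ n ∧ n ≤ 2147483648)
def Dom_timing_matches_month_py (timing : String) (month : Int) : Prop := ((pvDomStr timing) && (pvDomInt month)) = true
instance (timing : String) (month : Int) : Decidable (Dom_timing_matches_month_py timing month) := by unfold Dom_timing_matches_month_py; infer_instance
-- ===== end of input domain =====

-- B computes the season arithmetically ((month % 12) // 3 indexing a 4-name tuple) instead of scanning A's season→months table (objective: alternative; no speed claim).

-- ===== PORT A =====
-- the seasons dict of A, in insertion order
def pvSeasonsA : List (String × List Int) :=
  [("spring", [3, 4, 5]), ("summer", [6, 7, 8]), ("fall", [9, 10, 11]),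
   ("autumn", [9, 10, 11]), ("winter", [12, 1, 2])]

-- the 'for season, months in seasons.items()' loop with its early return; falls through to the year-round/ongoing test
def pvLoopA (timing : String) (month : Int) : List (String × List Int) → Bool
  | [] =>
      PySem.Str.isIn "year-round" (PySem.Str.lower timing) ||
      PySem.Str.isIn "ongoing" (PySem.Str.lower timing)
  | (season, months) :: rest =>
      if PySem.Str.isIn season (PySem.Str.lower timing) && months.contains month then true
      else pvLoopA timing month rest

def timing_matches_month_py (timing : String) (month : Int) : Bool :=
  pvLoopA timing month pvSeasonsA

-- ===== PORT B =====
-- season index (month % 12) // 3 : 0 winter, 1 spring, 2 summer, 3 fall; the inner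
-- tuple index is always in 0..3 thanks to the range guard, so getD's default is never used.
def timing_matches_month_py_alt (timing : String) (month : Int) : Bool :=
  let lowered := PySem.Str.lower timing
  if 1 ≤ month ∧ month ≤ 12 then
    let idx := PySem.Int.floordiv (PySem.Int.mod month 12) 3
    let name := (PySem.List.pyGet? ["winter", "spring", "summer", "fall"] idx).getD ""
    if PySem.Str.isIn name lowered || (idx == 3 && PySem.Str.isIn "autumn" lowered) then
      true
    else
      PySem.Str.isIn "year-round" lowered || PySem.Str.isIn "ongoing" lowered
  else
    PySem.Str.isIn "year-round" lowered || PySem.Str.isIn "ongoing" lowered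

-- ===== PRECONDITION & SPEC =====
def Spec_timing_matches_month_py (timing : String) (month : Int) (out : Bool) : Prop := out = timing_matches_month_py_alt timing month
instance (timing : String) (month : Int) (out : Bool) : Decidable (Spec_timing_matches_month_py timing month out) := by unfold Spec_timing_matches_month_py; infer_instance

-- ===== CLAIM =====
def Claim_equal_timing_matches_month_py : Prop := ∀ (timing : String) (month : Int), Dom_timing_matches_month_py timing month → Spec_timing_matches_month_py timing month (timing_matches_month_py timing month)

-- ===== LEMMAS AND PROOFS =====

-- ===== VERDICT =====
theorem timing_matches_month_py_spec : Claim_equal_timing_matches_month_py := by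
  intro timing month _
  unfold Spec_timing_matches_month_py timing_matches_month_py timing_matches_month_py_alt
  by_cases h1 : month = 1
  · subst month; simp [pvLoopA, pvSeasonsA]
  by_cases h2 : month = 2
  · subst month; simp [pvLoopA, pvSeasonsA]
  by_cases h3 : month = 3
  · subst month; simp [pvLoopA, pvSeasonsA]
  by_cases h4 : month = 4
  · subst month; simp [pvLoopA, pvSeasonsA]
  by_cases h5 : month = 5
  · subst month; simp [pvLoopA, pvSeasonsA]
  by_cases h6 : month = 6
  · subst month; simp [pvLoopA, pvSeasonsA]
  by_cases h7 : month = 7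
  · subst month; simp [pvLoopA, pvSeasonsA]
  by_cases h8 : month = 8
  · subst month; simp [pvLoopA, pvSeasonsA]
  by_cases h9 : month = 9
  · subst month; simp [pvLoopA, pvSeasonsA, Bool.or_assoc]
  by_cases h10 : month = 10
  · subst month; simp [pvLoopA, pvSeasonsA, Bool.or_assoc]
  by_cases h11 : month = 11
  · subst month; simp [pvLoopA, pvSeasonsA, Bool.or_assoc]
  by_cases h12 : month = 12
  · subst month; simp [pvLoopA, pvSeasonsA]
  · have hout : ¬ (1 ≤ month ∧ month ≤ 12) := by omega
    simp [pvLoopA, pvSeasonsA, List.contains_eq_mem, hout,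
      h1, h2, h3, h4, h5, h6, h7, h8, h9, h10, h11, h12]
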